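-- pv_equiv track=rewrite | github.com/shikhar1verma/code-architecture-mapper | backend/graphing/diagram_utils.py | infer_folder_group
-- ===== SOURCE A (Python) =====
-- def infer_folder_group(path: str) -> str:
--     """Infer group for folder structure"""
--     path_lower = path.lower()
--
--     if path_lower.startswith('frontend') or any(x in path_lower for x in ['src/components', 'src/pages', 'public']):
--         return "Frontend"
--     elif path_lower.startswith('backend') or any(x in path_lower for x in ['api', 'server', 'services']):
--         return "Backend"
--     elif any(x in path_lower for x in ['test', 'spec', '__tests__']):
--         return "Tests"
--     elif any(x in path_lower for x in ['config', 'settings', 'env']):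
--         return "Configuration"
--     elif any(x in path_lower for x in ['docs', 'documentation']):
--         return "Documentation"
--     else:
--         return "Project Root"
-- ===== SOURCE B (Python) =====
-- GROUPS = ["Frontend", "Backend", "Tests", "Configuration", "Documentation", "Project Root"]
--
-- # flat pattern list: (priority, is_prefix, pattern)
-- PATTERNS = [
--     (0, True, 'frontend'), (0, False, 'src/components'), (0, False, 'src/pages'), (0, False, 'public'),
--     (1, True, 'backend'), (1, False, 'api'), (1, False, 'server'), (1, False, 'services'),
--     (2, False, 'test'), (2, False, 'spec'), (2, False, '__tests__'),
--     (3, False, 'config'), (3, False, 'settings'), (3, False, 'env'),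
--     (4, False, 'docs'), (4, False, 'documentation'),
-- ]
--
--
-- def infer_folder_group(path: str) -> str:
--     """Infer group: minimum priority over all matching patterns, then index the name table."""
--     p = path.lower()
--     best = len(GROUPS) - 1
--     for pri, is_prefix, pat in PATTERNS:
--         if pri < best and (p.startswith(pat) if is_prefix else pat in p):
--             best = pri
--     return GROUPS[best]
-- ===== Notes on version B (the rewrite author's own statement) =====
-- stated objective: alternative
-- what changed: Replaced the if/elif first-match cascade by an aggregation: one pass over a flat list of (priority, kind, pattern) entries computing the minimum priority of any matching pattern, then indexing a group-name table.
import Mathlib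
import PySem

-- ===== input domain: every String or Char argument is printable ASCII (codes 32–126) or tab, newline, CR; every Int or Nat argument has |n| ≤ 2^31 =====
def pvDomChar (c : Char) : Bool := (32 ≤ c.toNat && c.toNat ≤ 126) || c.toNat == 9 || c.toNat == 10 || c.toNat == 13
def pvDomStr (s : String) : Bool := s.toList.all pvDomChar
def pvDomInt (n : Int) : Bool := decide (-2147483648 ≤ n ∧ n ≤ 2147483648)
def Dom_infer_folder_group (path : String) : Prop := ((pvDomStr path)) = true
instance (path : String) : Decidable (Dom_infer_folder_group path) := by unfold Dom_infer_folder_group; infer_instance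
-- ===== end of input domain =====

-- B replaces A's first-match if/elif cascade by an aggregation: the minimum priority over
-- a flat list of (priority, kind, pattern) entries, then an index into the group-name table
-- (objective: alternative).

-- ===== PORT A =====
def infer_folder_group (path : String) : String :=
  let path_lower := PySem.Str.lower path
  if PySem.Str.startswith path_lower "frontend"
      || ["src/components", "src/pages", "public"].any (fun x => PySem.Str.isIn x path_lower) then
    "Frontend"
  else if PySem.Str.startswith path_lower "backend"
      || ["api", "server", "services"].any (fun x => PySem.Str.isIn x path_lower) then
    "Backend"
  else if ["test", "spec", "__tests__"].any (fun x => PySem.Str.isIn x path_lower) then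
    "Tests"
  else if ["config", "settings", "env"].any (fun x => PySem.Str.isIn x path_lower) then
    "Configuration"
  else if ["docs", "documentation"].any (fun x => PySem.Str.isIn x path_lower) then
    "Documentation"
  else
    "Project Root"

-- ===== PORT B =====
def pvGroups : List String :=
  ["Frontend", "Backend", "Tests", "Configuration", "Documentation", "Project Root"]

def pvPatterns : List (Nat × Bool × String) :=
  [ (0, true, "frontend"), (0, false, "src/components"), (0, false, "src/pages"), (0, false, "public"),
    (1, true, "backend"), (1, false, "api"), (1, false, "server"), (1, false, "services"),
    (2, false, "test"), (2, false, "spec"), (2, false, "__tests__"),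
    (3, false, "config"), (3, false, "settings"), (3, false, "env"),
    (4, false, "docs"), (4, false, "documentation") ]

def infer_folder_group_alt (path : String) : String :=
  let p := PySem.Str.lower path
  let best := pvPatterns.foldl
    (fun b e =>
      if decide (e.1 < b) && (if e.2.1 then PySem.Str.startswith p e.2.2 else PySem.Str.isIn e.2.2 p)
      then e.1 else b)
    (pvGroups.length - 1)
  pvGroups.getD best "Project Root"

-- ===== PRECONDITION & SPEC =====
def Spec_infer_folder_group (path : String) (out : String) : Prop := out = infer_folder_group_alt path
instance (path : String) (out : String) : Decidable (Spec_infer_folder_group path out) := by unfold Spec_infer_folder_group; infer_instance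

-- ===== CLAIM (what is proved, stated in full; the proofs are below) =====
def Claim_equal_infer_folder_group : Prop := ∀ (path : String), Dom_infer_folder_group path → Spec_infer_folder_group path (infer_folder_group path)



-- ===== VERDICT (by name: the statement is the Claim_ definition above) =====
-- ===== LEMMAS AND PROOFS =====
lemma pvFoldStable (m : Nat × Bool × String → Bool) :
    ∀ (l : List (Nat × Bool × String)) (b : Nat), (∀ e ∈ l, ¬ e.1 < b) →
      l.foldl (fun b e => if decide (e.1 < b) && m e then e.1 else b) b = b := by
  intro l
  induction l with
  | nil => intro b _; rfl
  | cons e l ih =>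
    intro b h
    have he : ¬ e.1 < b := h e (List.mem_cons_self ..)
    simp only [List.foldl, he, decide_false, Bool.false_and]
    exact ih b (fun e' h' => h e' (List.mem_cons_of_mem _ h'))

lemma pvFoldFind (m : Nat × Bool × String → Bool) :
    ∀ (l : List (Nat × Bool × String)) (b : Nat),
      List.Pairwise (fun a c => a.1 ≤ c.1) l →
      l.foldl (fun b e => if decide (e.1 < b) && m e then e.1 else b) b
        = match l.find? (fun e => decide (e.1 < b) && m e) with
          | some e => e.1
          | none => b := by
  intro l
  induction l with
  | nil => intro b _; rfl
  | cons e l ih =>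
    intro b hp
    rcases List.pairwise_cons.mp hp with ⟨hhead, htail⟩
    by_cases hc : (decide (e.1 < b) && m e) = true
    · simp only [List.foldl, List.find?_cons, hc, if_true]
      exact pvFoldStable m l e.1 (fun e' h' => Nat.not_lt.mpr (hhead e' h'))
    · have hc' : (decide (e.1 < b) && m e) = false := by
        revert hc; cases (decide (e.1 < b) && m e) <;> simp
      simp only [List.foldl, List.find?_cons, hc', if_false, Bool.false_eq_true]
      exact ih b htail

-- ===== VERDICT (by name: the statement is the Claim_ definition above) =====
theorem infer_folder_group_spec : Claim_equal_infer_folder_group := by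
  intro path _
  show infer_folder_group path = infer_folder_group_alt path
  unfold infer_folder_group infer_folder_group_alt
  simp only []
  rw [pvFoldFind _ pvPatterns (pvGroups.length - 1) (by decide)]
  simp only [pvPatterns, pvGroups, List.find?, List.any, List.length, Bool.or_false]
  generalize PySem.Str.startswith (PySem.Str.lower path) "frontend" = x0
  generalize PySem.Str.isIn "src/components" (PySem.Str.lower path) = x1
  generalize PySem.Str.isIn "src/pages" (PySem.Str.lower path) = x2
  generalize PySem.Str.isIn "public" (PySem.Str.lower path) = x3
  generalize PySem.Str.startswith (PySem.Str.lower path) "backend" = x4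
  generalize PySem.Str.isIn "api" (PySem.Str.lower path) = x5
  generalize PySem.Str.isIn "server" (PySem.Str.lower path) = x6
  generalize PySem.Str.isIn "services" (PySem.Str.lower path) = x7
  generalize PySem.Str.isIn "test" (PySem.Str.lower path) = x8
  generalize PySem.Str.isIn "spec" (PySem.Str.lower path) = x9
  generalize PySem.Str.isIn "__tests__" (PySem.Str.lower path) = x10
  generalize PySem.Str.isIn "config" (PySem.Str.lower path) = x11
  generalize PySem.Str.isIn "settings" (PySem.Str.lower path) = x12
  generalize PySem.Str.isIn "env" (PySem.Str.lower path) = x13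
  generalize PySem.Str.isIn "docs" (PySem.Str.lower path) = x14
  generalize PySem.Str.isIn "documentation" (PySem.Str.lower path) = x15
  cases x0 with
  | true => simp
  | false =>
  cases x1 with
  | true => simp
  | false =>
  cases x2 with
  | true => simp
  | false =>
  cases x3 with
  | true => simp
  | false =>
  cases x4 with
  | true => simp
  | false =>
  cases x5 with
  | true => simp
  | false =>
  cases x6 with
  | true => simp
  | false =>
  cases x7 with
  | true => simp
  | false =>
  cases x8 with
  | true => simp
  | false =>
  cases x9 with
  | true => simp
  | false =>
  cases x10 with
  | true => simp
  | false =>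
  cases x11 with
  | true => simp
  | false =>
  cases x12 with
  | true => simp
  | false =>
  cases x13 with
  | true => simp
  | false =>
  cases x14 with
  | true => simp
  | false =>
  cases x15 with
  | true => simp
  | false =>
  simp
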